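-- pv_equiv track=rewrite | github.com/elqabasy/algorithms | rdnn.py | right_dominant
-- ===== SOURCE A (Python) =====
-- def right_dominant(L):
--     D=[]
--     for i in range(len(L)):
--         is_dominant=True
--         for j in range(i+1,len(L)):
--             if(L[i]<=L[j]):
--                 is_dominant=False
--                 break
--         if(is_dominant):
--             D.append(L[i])
--     return D
-- ===== SOURCE B (Python) =====
-- def right_dominant(L):
--     res = []
--     m = None
--     for x in reversed(L):
--         if m is None or x > m:
--             res.append(x)
--             m = x
--     res.reverse()
--     return res
-- ===== Notes on version B (the rewrite author's own statement) =====
-- stated objective: faster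
-- what changed: Replaced the quadratic index-based scan (for each element, an inner loop over all later elements) with a single right-to-left pass tracking the running suffix maximum, emitting an element exactly when it exceeds it.
import Mathlib
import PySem

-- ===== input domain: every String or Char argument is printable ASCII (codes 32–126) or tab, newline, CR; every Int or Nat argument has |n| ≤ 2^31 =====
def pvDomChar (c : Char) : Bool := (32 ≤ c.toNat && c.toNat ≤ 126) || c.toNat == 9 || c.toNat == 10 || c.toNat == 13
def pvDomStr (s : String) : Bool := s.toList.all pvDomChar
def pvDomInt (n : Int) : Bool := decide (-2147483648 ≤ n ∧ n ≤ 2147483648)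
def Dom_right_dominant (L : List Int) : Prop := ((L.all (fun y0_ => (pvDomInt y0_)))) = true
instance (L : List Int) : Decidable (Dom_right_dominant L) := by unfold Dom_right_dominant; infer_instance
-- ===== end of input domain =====

-- B replaces A's quadratic nested index scan by a single right-to-left pass over the
-- list tracking the running suffix maximum (objective: faster, O(n^2) → O(n)).

-- ===== PORT A =====
-- inner loop: for j in range(i+1, len(L)): if L[i] <= L[j]: is_dominant = False; break
def pvInnerA (L : List Int) (x : Int) : List Int → Bool
  | [] => true
  | j :: rest =>
    if x ≤ PySem.List.pyGetD L j 0 then false else pvInnerA L x rest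

def right_dominant (L : List Int) : List Int :=
  (PySem.List.pyRange 0 (L.length : Int) 1).foldl
    (fun D i =>
      if pvInnerA L (PySem.List.pyGetD L i 0)
          (PySem.List.pyRange (i + 1) (L.length : Int) 1)
      then D ++ [PySem.List.pyGetD L i 0] else D) []

-- ===== PORT B =====
-- one step of the right-to-left pass: state = (running suffix max m, res so far)
def pvAltStep (st : Option Int × List Int) (x : Int) : Option Int × List Int :=
  match st.1 with
  | none => (some x, st.2 ++ [x])
  | some m => if x > m then (some x, st.2 ++ [x]) else st

def right_dominant_alt (L : List Int) : List Int :=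
  ((L.reverse.foldl pvAltStep (none, [])).2).reverse

-- ===== PRECONDITION & SPEC =====
def Spec_right_dominant (L : List Int) (out : List Int) : Prop := out = right_dominant_alt L
instance (L : List Int) (out : List Int) : Decidable (Spec_right_dominant L out) := by unfold Spec_right_dominant; infer_instance

-- ===== CLAIM (what is proved, stated in full; the proofs are below) =====
def Claim_equal_right_dominant : Prop := ∀ (L : List Int), Dom_right_dominant L → Spec_right_dominant L (right_dominant L)

-- ===== LEMMAS AND PROOFS =====

-- common characterisation: keep an element iff it is strictly greater than every later one
def pvSpecF : List Int → List Int
  | [] => []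
  | x :: rest => if rest.all (fun y => decide (y < x)) then x :: pvSpecF rest else pvSpecF rest

-- maximum of a list as A/B both observe it
def pvMaxOpt : List Int → Option Int
  | [] => none
  | x :: r =>
    match pvMaxOpt r with
    | none => some x
    | some m => some (if m < x then x else m)

lemma pvAll_lt_iff (L : List Int) (x : Int) :
    L.all (fun y => decide (y < x)) =
      (match pvMaxOpt L with | none => true | some m => decide (m < x)) := by
  induction L with
  | nil => simp [pvMaxOpt]
  | cons y r ih =>
    simp only [List.all_cons, pvMaxOpt, ih]
    cases hr : pvMaxOpt r with
    | none => simp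
    | some m =>
      by_cases h : m < y <;> by_cases hy : y < x <;> by_cases hm : m < x <;>
        simp [h, hy, hm] <;> omega

lemma pvAltInv (L : List Int) :
    L.reverse.foldl pvAltStep (none, []) = (pvMaxOpt L, (pvSpecF L).reverse) := by
  induction L with
  | nil => simp [pvMaxOpt, pvSpecF]
  | cons x L' ih =>
    have : (x :: L').reverse = L'.reverse ++ [x] := by simp
    rw [this, List.foldl_append, ih]
    simp only [List.foldl_cons, List.foldl_nil]
    cases hm : pvMaxOpt L' with
    | none =>
      have hall : L'.all (fun y => decide (y < x)) = true := by
        rw [pvAll_lt_iff, hm]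
      simp [pvAltStep, pvMaxOpt, pvSpecF, hm, hall]
    | some m =>
      have hall : L'.all (fun y => decide (y < x)) = decide (m < x) := by
        rw [pvAll_lt_iff, hm]
      by_cases h : m < x
      · simp [pvAltStep, pvMaxOpt, pvSpecF, hm, hall, h]
      · simp [pvAltStep, pvMaxOpt, pvSpecF, hm, hall, h]

lemma pvInnerA_eq_all (L : List Int) (x : Int) (js : List Int) :
    pvInnerA L x js = js.all (fun j => decide (PySem.List.pyGetD L j 0 < x)) := by
  induction js with
  | nil => rfl
  | cons j rest ih =>
    simp only [pvInnerA, List.all_cons, ih]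
    by_cases h : x ≤ PySem.List.pyGetD L j 0
    · simp [h]
    · simp [h]; omega

lemma pvInner_drop (L : List Int) (x : Int) (j : Nat) :
    pvInnerA L x (PySem.List.pyRange (j : Int) (L.length : Int) 1)
      = (L.drop j).all (fun y => decide (y < x)) := by
  rw [pvInnerA_eq_all]
  have hmap := PySem.List.map_pyGetD_pyRange' L 0 (a := (j : Int)) (by positivity)
  calc (PySem.List.pyRange (j : Int) (L.length : Int) 1).all
          (fun i => decide (PySem.List.pyGetD L i 0 < x))
      = ((PySem.List.pyRange (j : Int) (L.length : Int) 1).map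
          (fun i => PySem.List.pyGetD L i 0)).all (fun y => decide (y < x)) := by
        rw [List.all_map]; rfl
    _ = (L.drop j).all (fun y => decide (y < x)) := by rw [hmap]; simp

lemma pvOuter (L : List Int) (m j : Nat) (hm : L.length - j = m) (D : List Int) :
    (PySem.List.pyRange (j : Int) (L.length : Int) 1).foldl
      (fun D i =>
        if pvInnerA L (PySem.List.pyGetD L i 0)
            (PySem.List.pyRange (i + 1) (L.length : Int) 1)
        then D ++ [PySem.List.pyGetD L i 0] else D) D
      = D ++ pvSpecF (L.drop j) := by
  induction m generalizing j D with
  | zero =>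
    have hj : L.length ≤ j := by omega
    rw [PySem.List.pyRange_one_eq_nil (by exact_mod_cast hj),
        List.drop_eq_nil_of_le hj]
    simp [pvSpecF]
  | succ m ih =>
    have hj : j < L.length := by omega
    rw [PySem.List.pyRange_one_cons (by exact_mod_cast hj)]
    simp only [List.foldl_cons]
    have hget : PySem.List.pyGetD L (j : Int) 0 = L[j] := by
      rw [PySem.List.pyGetD_natCast]
      simp [List.getD, hj]
    have hcast : (j : Int) + 1 = ((j + 1 : Nat) : Int) := by push_cast; ring
    have hcond : pvInnerA L (PySem.List.pyGetD L (j : Int) 0)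
        (PySem.List.pyRange ((j : Int) + 1) (L.length : Int) 1)
        = (L.drop (j + 1)).all (fun y => decide (y < L[j])) := by
      rw [hget, hcast, pvInner_drop]
    have hdrop : L.drop j = L[j] :: L.drop (j + 1) :=
      List.drop_eq_getElem_cons hj
    rw [hcond, hcast, ih (j + 1) (by omega)]
    rw [hdrop]
    by_cases hc : (L.drop (j + 1)).all (fun y => decide (y < L[j]))
    · simp [pvSpecF, hc, hget]
    · simp [pvSpecF, hc]

lemma pvA_eq_specF (L : List Int) : right_dominant L = pvSpecF L := by
  have := pvOuter L L.length 0 (by omega) []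
  simpa [right_dominant] using this

lemma pvB_eq_specF (L : List Int) : right_dominant_alt L = pvSpecF L := by
  unfold right_dominant_alt
  rw [pvAltInv]
  simp

-- ===== VERDICT (by name: the statement is the Claim_ definition above) =====
theorem right_dominant_spec : Claim_equal_right_dominant := by
  intro L _
  unfold Spec_right_dominant
  rw [pvA_eq_specF, pvB_eq_specF]
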